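-- pv_equiv track=rewrite | github.com/naveenprajapati12/Python-Code | Python Code/findSurpasser.py | findSurpasser
-- ===== SOURCE A (Python) =====
-- def findSurpasser(arr):
--     a=[]
--     for i in range(0,len(arr)):
--         count=0
--         for j in range(i+1,len(arr)):
--             if arr[i]<arr[j]:
--                 count+=1
--         a.append(count)
--     return ' '.join(map(str,a))
-- ===== SOURCE B (Python) =====
-- def findSurpasser(arr):
--     # Right-to-left pass keeping the already-seen suffix in a sorted list:
--     # the surpasser count of x is the number of kept elements above x's
--     # insertion point.
--     counts = []
--     s = []  # sorted ascending: elements to the right of the current one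
--     for x in reversed(arr):
--         pos = 0
--         while pos < len(s) and s[pos] <= x:
--             pos += 1
--         counts.append(len(s) - pos)
--         s[pos:pos] = [x]
--     counts.reverse()
--     return ' '.join(map(str, counts))
-- ===== Notes on version B (the rewrite author's own statement) =====
-- stated objective: alternative
-- what changed: A scans the whole remaining suffix for every index with two nested index loops; B makes one right-to-left pass that maintains the already-seen suffix as a sorted list and reads each surpasser count off the element's insertion point in it.
import Mathlib
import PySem

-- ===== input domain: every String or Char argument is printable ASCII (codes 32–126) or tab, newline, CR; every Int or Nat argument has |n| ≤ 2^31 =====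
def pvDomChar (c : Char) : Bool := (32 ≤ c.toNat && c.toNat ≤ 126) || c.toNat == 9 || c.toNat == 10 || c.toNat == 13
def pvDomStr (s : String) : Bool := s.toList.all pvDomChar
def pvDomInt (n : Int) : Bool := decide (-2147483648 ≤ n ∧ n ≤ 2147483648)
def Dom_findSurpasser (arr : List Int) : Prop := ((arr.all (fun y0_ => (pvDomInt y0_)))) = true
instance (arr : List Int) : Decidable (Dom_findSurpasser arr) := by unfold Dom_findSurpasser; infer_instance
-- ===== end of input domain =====

-- B replaces A's nested index loops by a single right-to-left pass that keeps the
-- already-seen suffix in a sorted list and reads each count off the insertion point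
-- (objective: alternative; different algorithm, similar worst-case cost).

-- ===== PORT A =====
-- literal transliteration of A: for i in range(0, len(arr)): count over j in range(i+1, len(arr))
def findSurpasser (arr : List Int) : String :=
  PySem.Str.join " "
    (((PySem.List.pyRange 0 (arr.length : Int)).foldl (fun a i =>
      a ++ [(PySem.List.pyRange (i + 1) (arr.length : Int)).foldl (fun count j =>
        if PySem.List.pyGetD arr i 0 < PySem.List.pyGetD arr j 0 then count + 1 else count) (0 : Int)])
      ([] : List Int)).map PySem.Int.toStr)

-- ===== PORT B =====
-- transliteration of B's inner while loop: advance pos while pos < len(s) and s[pos] <= x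
def posWhile (s : List Int) (x : Int) : Nat :=
  match s with
  | [] => 0
  | y :: t => if y ≤ x then posWhile t x + 1 else 0

def findSurpasser_alt (arr : List Int) : String :=
  PySem.Str.join " "
    (((arr.reverse.foldl (fun (st : List Int × List Int) x =>
      (st.1 ++ [(st.2.length : Int) - (posWhile st.2 x : Int)], st.2.insertIdx (posWhile st.2 x) x))
      (([], []) : List Int × List Int)).1.reverse).map PySem.Int.toStr)

-- ===== PRECONDITION & SPEC =====
def Spec_findSurpasser (arr : List Int) (out : String) : Prop := out = findSurpasser_alt arr
instance (arr : List Int) (out : String) : Decidable (Spec_findSurpasser arr out) := by unfold Spec_findSurpasser; infer_instance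

-- ===== CLAIM (what is proved, stated in full; the proofs are below) =====
def Claim_equal_findSurpasser : Prop := ∀ (arr : List Int), Dom_findSurpasser arr → Spec_findSurpasser arr (findSurpasser arr)

-- ===== LEMMAS AND PROOFS =====

-- the common value: for each element, the number of strictly greater elements to its right
def cnt : List Int → List Int
  | [] => []
  | x :: t => ((t.countP (fun y => decide (x < y)) : Nat) : Int) :: cnt t

-- bridge from PySem.List.foldl_count_if to the Prop-valued `if` the ports elaborate to
lemma foldl_count_lt (x : Int) (l : List Int) (a : Int) :
    l.foldl (fun acc y => if x < y then acc + 1 else acc) a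
      = a + ((l.countP (fun y => decide (x < y)) : Nat) : Int) := by
  simpa using PySem.List.foldl_count_if (fun y => decide (x < y)) l a

-- ---- A side ----

lemma inner_count (arr : List Int) (i : Nat) :
    (PySem.List.pyRange ((i : Int) + 1) (arr.length : Int)).foldl
      (fun count j => if PySem.List.pyGetD arr (i : Int) 0 < PySem.List.pyGetD arr j 0
        then count + 1 else count) (0 : Int)
      = (((arr.drop (i + 1)).countP (fun y => decide (arr.getD i 0 < y)) : Nat) : Int) := by
  have h1 : ((i : Int) + 1) = (((i + 1 : Nat)) : Int) := by push_cast; ring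
  have h2 : ((arr.length : Nat) : Int) = PySem.List.len arr := by simp [PySem.List.len_eq]
  rw [h1, h2, PySem.List.foldl_pyRange_pyGetD arr 0
        (fun count y => if PySem.List.pyGetD arr (i : Int) 0 < y then count + 1 else count) 0
        (by positivity)]
  simp only [Int.toNat_natCast, PySem.List.pyGetD_natCast]
  exact (foldl_count_lt (arr.getD i 0) (arr.drop (i + 1)) 0).trans (by ring)

lemma map_range_cnt : ∀ arr : List Int,
    (List.range arr.length).map (fun k =>
      (((arr.drop (k + 1)).countP (fun y => decide (arr.getD k 0 < y)) : Nat) : Int)) = cnt arr := by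
  intro arr
  induction arr with
  | nil => simp [cnt]
  | cons x t ih =>
    rw [List.length_cons, List.range_succ_eq_map, List.map_cons, List.map_map]
    simp only [List.drop_succ_cons, List.getD_cons_zero, cnt]
    congr 1

lemma a_counts (arr : List Int) :
    (PySem.List.pyRange 0 (arr.length : Int)).foldl (fun a i =>
      a ++ [(PySem.List.pyRange (i + 1) (arr.length : Int)).foldl (fun count j =>
        if PySem.List.pyGetD arr i 0 < PySem.List.pyGetD arr j 0 then count + 1 else count) (0 : Int)])
      ([] : List Int) = cnt arr := by
  rw [PySem.List.foldl_append_singleton_eq_map, PySem.List.pyRange_zero_nat, List.map_map,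
    ← map_range_cnt arr]
  apply List.map_congr_left
  intro k _
  exact inner_count arr k

-- ---- B side ----

lemma posWhile_le (s : List Int) (x : Int) : posWhile s x ≤ s.length := by
  induction s with
  | nil => simp [posWhile]
  | cons y t ih =>
    by_cases h : y ≤ x
    · simp only [posWhile, h, if_true, List.length_cons]; omega
    · simp [posWhile, h]

lemma posWhile_pairwise (s : List Int) (x : Int) (hs : s.Pairwise (· ≤ ·)) :
    posWhile s x = s.countP (fun y => decide (y ≤ x)) := by
  induction s with
  | nil => simp [posWhile]
  | cons y t ih =>
    rw [List.pairwise_cons] at hs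
    by_cases h : y ≤ x
    · simp [posWhile, h, ih hs.2]
    · have h0 : t.countP (fun y => decide (y ≤ x)) = 0 := by
        rw [List.countP_eq_zero]
        intro z hz
        have := hs.1 z hz
        simp; omega
      simp [posWhile, h, h0]

lemma count_pairwise (s : List Int) (x : Int) (hs : s.Pairwise (· ≤ ·)) :
    (s.length : Int) - (posWhile s x : Int)
      = ((s.countP (fun y => decide (x < y)) : Nat) : Int) := by
  rw [posWhile_pairwise s x hs]
  have h := List.length_eq_countP_add_countP (fun y => decide (y ≤ x)) (l := s)
  have he : s.countP (fun a => decide ¬((fun y => decide (y ≤ x)) a = true))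
      = s.countP (fun y => decide (x < y)) := by
    apply List.countP_congr
    intro z _
    simp
  rw [he] at h
  omega

lemma insertIdx_posWhile_pairwise (s : List Int) (x : Int) (hs : s.Pairwise (· ≤ ·)) :
    (s.insertIdx (posWhile s x) x).Pairwise (· ≤ ·) := by
  induction s with
  | nil => simp [posWhile]
  | cons y t ih =>
    rw [List.pairwise_cons] at hs
    by_cases h : y ≤ x
    · simp only [posWhile, h, if_true, List.insertIdx_succ_cons]
      rw [List.pairwise_cons]
      refine ⟨?_, ih hs.2⟩
      intro b hb
      rw [List.mem_insertIdx (posWhile_le t x)] at hb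
      rcases hb with rfl | hb
      · exact h
      · exact hs.1 b hb
    · simp only [posWhile, h, if_false, List.insertIdx_zero]
      rw [List.pairwise_cons]
      refine ⟨?_, List.pairwise_cons.mpr hs⟩
      intro b hb
      rcases List.mem_cons.mp hb with rfl | hb
      · omega
      · have := hs.1 b hb; omega

-- the counts B produces, starting from a seen-so-far list s (only its multiset matters)
def bCounts : List Int → List Int → List Int
  | [], _ => []
  | x :: t, s => ((s.countP (fun y => decide (x < y)) : Nat) : Int) :: bCounts t (x :: s)

lemma bCounts_perm (l : List Int) : ∀ s1 s2 : List Int, s1.Perm s2 → bCounts l s1 = bCounts l s2 := by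
  induction l with
  | nil => intro _ _ _; rfl
  | cons x t ih =>
    intro s1 s2 hp
    simp only [bCounts, hp.countP_eq, ih (x :: s1) (x :: s2) (hp.cons x)]

lemma b_loop (l : List Int) : ∀ (c s : List Int), s.Pairwise (· ≤ ·) →
    (l.foldl (fun (st : List Int × List Int) x =>
      (st.1 ++ [(st.2.length : Int) - (posWhile st.2 x : Int)], st.2.insertIdx (posWhile st.2 x) x))
      (c, s)).1 = c ++ bCounts l s := by
  induction l with
  | nil => intro c s _; simp [bCounts]
  | cons x t ih =>
    intro c s hs
    simp only [List.foldl_cons]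
    rw [ih _ _ (insertIdx_posWhile_pairwise s x hs),
        bCounts_perm t _ _ (List.perm_insertIdx x s (posWhile_le s x)),
        count_pairwise s x hs]
    simp [bCounts]

lemma bCounts_append (u v : List Int) : ∀ s : List Int,
    bCounts (u ++ v) s = bCounts u s ++ bCounts v (u.reverse ++ s) := by
  induction u with
  | nil => intro s; simp [bCounts]
  | cons x t ih =>
    intro s
    simp only [List.cons_append, bCounts, ih (x :: s), List.reverse_cons, List.append_assoc]
    rfl

lemma bCounts_reverse (arr : List Int) : (bCounts arr.reverse []).reverse = cnt arr := by
  induction arr with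
  | nil => rfl
  | cons x t ih =>
    rw [List.reverse_cons, bCounts_append t.reverse [x] []]
    simp only [List.reverse_append, List.reverse_reverse, List.append_nil]
    simp [bCounts, cnt, ih]

-- ===== VERDICT (by name: the statement is the Claim_ definition above) =====
theorem findSurpasser_spec : Claim_equal_findSurpasser := by
  intro arr _
  unfold Spec_findSurpasser findSurpasser findSurpasser_alt
  rw [a_counts arr, b_loop arr.reverse [] [] (by simp), List.nil_append, bCounts_reverse arr]
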